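-- pv_equiv track=rewrite | github.com/garrettfoster13/sccmhunter | lib/python3.11/site-packages/cmd2/utils.py | strip_doc_annotations
-- ===== SOURCE A (Python) =====
-- def strip_doc_annotations(doc: str) -> str:
--     """
--     Strip annotations from a docstring leaving only the text description
--
--     :param doc: documentation string
--     """
--     # Attempt to locate the first documentation block
--     cmd_desc = ''
--     found_first = False
--     for doc_line in doc.splitlines():
--         stripped_line = doc_line.strip()
--
--         # Don't include :param type lines
--         if stripped_line.startswith(':'):
--             if found_first:
--                 break
--         elif stripped_line:
--             if found_first:
--                 cmd_desc += "\n"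
--             cmd_desc += stripped_line
--             found_first = True
--         elif found_first:
--             break
--     return cmd_desc
-- ===== SOURCE B (Python) =====
-- def _drop_skipped(lines):
--     """Discard leading lines that are empty or start with ':'."""
--     while lines and (not lines[0] or lines[0].startswith(':')):
--         lines = lines[1:]
--     return lines
--
--
-- def _take_desc(lines):
--     """Keep the contiguous leading run of non-empty lines not starting with ':'."""
--     out = []
--     for line in lines:
--         if not line or line.startswith(':'):
--             break
--         out.append(line)
--     return out
--
--
-- def strip_doc_annotations(doc: str) -> str:
--     """
--     Strip annotations from a docstring leaving only the text description
--
--     :param doc: documentation string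
--     """
--     lines = [line.strip() for line in doc.splitlines()]
--     return '\n'.join(_take_desc(_drop_skipped(lines)))
-- ===== Notes on version B (the rewrite author's own statement) =====
-- stated objective: idiomatic
-- what changed: Replaces the stateful found_first/break loop with a two-phase drop-then-take pipeline over the pre-stripped lines, joined back with newlines.
import Mathlib
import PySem

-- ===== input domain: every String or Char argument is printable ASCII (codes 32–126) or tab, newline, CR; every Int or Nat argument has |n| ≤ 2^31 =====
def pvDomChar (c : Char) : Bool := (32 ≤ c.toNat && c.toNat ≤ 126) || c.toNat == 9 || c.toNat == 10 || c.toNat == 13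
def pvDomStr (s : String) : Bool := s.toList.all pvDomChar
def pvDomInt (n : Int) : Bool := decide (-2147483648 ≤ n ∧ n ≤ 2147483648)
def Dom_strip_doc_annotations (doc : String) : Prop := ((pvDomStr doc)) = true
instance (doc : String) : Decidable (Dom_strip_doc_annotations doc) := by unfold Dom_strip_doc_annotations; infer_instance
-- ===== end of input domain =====

-- B replaces A's stateful found_first/break loop by a drop-skipped-prefix then take-description phase (objective: idiomatic decomposition).

-- ===== PORT A =====
-- the for-loop with its found_first flag and breaks, as structural recursion over the lines
def stripDocLoopA : List String → String → Bool → String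
  | [], cmd_desc, _ => cmd_desc
  | doc_line :: rest, cmd_desc, found_first =>
    let stripped_line := PySem.Str.strip doc_line
    if PySem.Str.startswith stripped_line ":" then
      if found_first then cmd_desc else stripDocLoopA rest cmd_desc found_first
    else if stripped_line ≠ "" then
      let cmd_desc := if found_first then cmd_desc ++ "\n" else cmd_desc
      stripDocLoopA rest (cmd_desc ++ stripped_line) true
    else
      if found_first then cmd_desc else stripDocLoopA rest cmd_desc found_first

def strip_doc_annotations (doc : String) : String :=
  stripDocLoopA (PySem.Str.splitlines doc) "" false

-- ===== PORT B =====
-- a line is skipped/terminal when it is empty or starts with ':'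
def pvSkip (s : String) : Bool := s == "" || PySem.Str.startswith s ":"

-- _drop_skipped: while lines and skip(lines[0]): lines = lines[1:]
def pvDropSkipped : List String → List String
  | [] => []
  | s :: rest => if pvSkip s then pvDropSkipped rest else s :: rest

-- _take_desc: append until a skip line breaks the loop
def pvTakeDesc : List String → List String
  | [] => []
  | s :: rest => if pvSkip s then [] else s :: pvTakeDesc rest

def strip_doc_annotations_alt (doc : String) : String :=
  let lines := (PySem.Str.splitlines doc).map PySem.Str.strip
  PySem.Str.join "\n" (pvTakeDesc (pvDropSkipped lines))

-- ===== PRECONDITION & SPEC =====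
def Spec_strip_doc_annotations (doc : String) (out : String) : Prop := out = strip_doc_annotations_alt doc
instance (doc : String) (out : String) : Decidable (Spec_strip_doc_annotations doc out) := by unfold Spec_strip_doc_annotations; infer_instance

-- ===== CLAIM (what is proved, stated in full; the proofs are below) =====
def Claim_equal_strip_doc_annotations : Prop := ∀ (doc : String), Dom_strip_doc_annotations doc → Spec_strip_doc_annotations doc (strip_doc_annotations doc)

-- ===== LEMMAS AND PROOFS =====

-- appending a fixed prefix commutes with the '\n'-joining fold
theorem foldl_append_pull (ts : List String) (p y : String) :
    p ++ ts.foldl (fun a t => a ++ "\n" ++ t) y = ts.foldl (fun a t => a ++ "\n" ++ t) (p ++ y) := by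
  induction ts generalizing y with
  | nil => rfl
  | cons t ts ih =>
    simp only [List.foldl_cons]
    rw [ih]; simp [String.append_assoc]

-- '\n'.join written as a left fold starting from the first element
theorem join_eq_foldl (ts : List String) (x : String) :
    PySem.Str.join "\n" (x :: ts) = ts.foldl (fun a t => a ++ "\n" ++ t) x := by
  induction ts generalizing x with
  | nil => simp [PySem.Str.join, PySem.Chars.join_singleton]
  | cons t ts ih =>
    have h : PySem.Str.join "\n" (x :: t :: ts) = x ++ "\n" ++ PySem.Str.join "\n" (t :: ts) := by
      simp [PySem.Str.join, PySem.Chars.join_cons_cons]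
      rw [show ('\n' :: PySem.Chars.join ['\n'] (t.toList :: List.map String.toList ts))
          = ['\n'] ++ PySem.Chars.join ['\n'] (t.toList :: List.map String.toList ts) from rfl,
        String.ofList_append, ← String.append_assoc]
    rw [h, ih, List.foldl_cons, foldl_append_pull]

-- once found_first is set, A appends exactly the lines B's _take_desc keeps
theorem loopA_found (ls : List String) (acc : String) :
    stripDocLoopA ls acc true
      = (pvTakeDesc (ls.map PySem.Str.strip)).foldl (fun a t => a ++ "\n" ++ t) acc := by
  induction ls generalizing acc with
  | nil => simp [stripDocLoopA, pvTakeDesc]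
  | cons l ls ih =>
    by_cases h1 : PySem.Chars.startswith (PySem.Chars.strip l.toList) [':'] = true
    · simp [stripDocLoopA, pvTakeDesc, pvSkip, h1]
    · by_cases h2 : PySem.Str.strip l = ""
      · simp [stripDocLoopA, pvTakeDesc, pvSkip, h2]
      · simp [stripDocLoopA, pvTakeDesc, pvSkip, h1, h2, ih]

-- before the first kept line, A skips exactly the lines B's _drop_skipped discards
theorem loopA_notfound (ls : List String) :
    stripDocLoopA ls "" false
      = PySem.Str.join "\n" (pvTakeDesc (pvDropSkipped (ls.map PySem.Str.strip))) := by
  induction ls with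
  | nil => simp [stripDocLoopA, pvDropSkipped, pvTakeDesc, PySem.Str.join, PySem.Chars.join_nil]
  | cons l ls ih =>
    by_cases h1 : PySem.Chars.startswith (PySem.Chars.strip l.toList) [':'] = true
    · simpa [stripDocLoopA, pvDropSkipped, pvSkip, h1] using ih
    · by_cases h2 : PySem.Str.strip l = ""
      · simpa [stripDocLoopA, pvDropSkipped, pvSkip, h1, h2] using ih
      · simp [stripDocLoopA, pvDropSkipped, pvTakeDesc, pvSkip, h1, h2,
          loopA_found, join_eq_foldl]

-- ===== VERDICT (by name: the statement is the Claim_ definition above) =====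
theorem strip_doc_annotations_spec : Claim_equal_strip_doc_annotations := by
  intro doc _
  unfold Spec_strip_doc_annotations strip_doc_annotations strip_doc_annotations_alt
  exact loopA_notfound _
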